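-- pv_equiv track=rewrite | github.com/HarshitGupta3017/LeetCode-Daily | Trionic Array I/Trionic Array I.py | isTrionic
-- ===== SOURCE A (Python) =====
-- from typing import List
--
-- def isTrionic(nums: List[int]) -> bool:
--
--     n = len(nums)
--     index = 0
--
--     # Phase 1: Strictly Increasing
--     while index + 1 < n and nums[index] < nums[index + 1]:
--         index += 1
--
--     # No increasing part OR reached the end
--     if index == 0 or index == n - 1:
--         return False
--
--     # Phase 2: Strictly Decreasing
--     while index + 1 < n and nums[index] > nums[index + 1]:
--         index += 1
--
--     # No final increasing phase
--     if index == n - 1: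
--         return False
--
--     # Phase 3: Strictly Increasing again
--     while index + 1 < n and nums[index] < nums[index + 1]:
--         index += 1
--
--     return index == n - 1
-- ===== SOURCE B (Python) =====
-- def isTrionic(nums):
--     signs = [(a < b) - (a > b) for a, b in zip(nums, nums[1:])]
--     collapsed = []
--     for s in signs:
--         if not collapsed or collapsed[-1] != s:
--             collapsed.append(s)
--     return collapsed == [1, -1, 1]
-- ===== Notes on version B (the rewrite author's own statement) =====
-- stated objective: alternative
-- what changed: Replaces the three sequential index-pointer scans with a derived sign sequence of adjacent differences, collapsed into runs and pattern-matched against the exact rise-fall-rise pattern.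
import Mathlib
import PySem

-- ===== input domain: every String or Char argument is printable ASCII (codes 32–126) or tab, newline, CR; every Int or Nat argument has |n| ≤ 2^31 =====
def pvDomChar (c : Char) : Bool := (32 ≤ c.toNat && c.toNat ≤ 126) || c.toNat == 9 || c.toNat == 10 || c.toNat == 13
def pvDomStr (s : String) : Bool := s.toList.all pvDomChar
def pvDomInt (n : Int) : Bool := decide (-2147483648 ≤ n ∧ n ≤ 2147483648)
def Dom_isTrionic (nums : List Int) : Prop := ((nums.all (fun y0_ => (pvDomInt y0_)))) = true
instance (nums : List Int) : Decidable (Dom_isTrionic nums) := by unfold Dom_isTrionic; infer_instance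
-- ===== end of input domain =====

-- B replaces A's three sequential pointer scans by a sign sequence of adjacent
-- differences collapsed into runs and matched against [1,-1,1] (alternative decomposition).

-- ===== PORT A =====
-- Python's `while index + 1 < n and nums[index] < nums[index+1]: index += 1`.
-- Indices read are guarded in range by the loop condition, so getD is exact here.
def pvUp (nums : List Int) (i : Nat) : Nat :=
  if i + 1 < nums.length ∧ nums.getD i 0 < nums.getD (i + 1) 0 then pvUp nums (i + 1) else i
termination_by nums.length - i
decreasing_by omega

-- Python's `while index + 1 < n and nums[index] > nums[index+1]: index += 1`.
def pvDown (nums : List Int) (i : Nat) : Nat :=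
  if i + 1 < nums.length ∧ nums.getD i 0 > nums.getD (i + 1) 0 then pvDown nums (i + 1) else i
termination_by nums.length - i
decreasing_by omega

def isTrionic (nums : List Int) : Bool :=
  let n := nums.length
  let i := pvUp nums 0
  if i = 0 ∨ i = n - 1 then false
  else
    let j := pvDown nums i
    if j = n - 1 then false
    else
      let k := pvUp nums j
      decide (k = n - 1)

-- ===== PORT B =====
-- `[(a < b) - (a > b) for a, b in zip(nums, nums[1:])]`
def pvSigns (nums : List Int) : List Int :=
  (nums.zip nums.tail).map fun p => (if p.1 < p.2 then (1 : Int) else 0) - (if p.1 > p.2 then 1 else 0)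

-- the `for s in signs: if not collapsed or collapsed[-1] != s: collapsed.append(s)` loop
def pvCollapse (signs : List Int) : List Int :=
  signs.foldl (fun acc s => if acc = [] ∨ acc.getLast? ≠ some s then acc ++ [s] else acc) []

def isTrionic_alt (nums : List Int) : Bool :=
  decide (pvCollapse (pvSigns nums) = [1, -1, 1])

-- ===== PRECONDITION & SPEC =====
def Spec_isTrionic (nums : List Int) (out : Bool) : Prop := out = isTrionic_alt nums
instance (nums : List Int) (out : Bool) : Decidable (Spec_isTrionic nums out) := by unfold Spec_isTrionic; infer_instance

-- ===== CLAIM (what is proved, stated in full; the proofs are below) =====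
def Claim_equal_isTrionic : Prop := ∀ (nums : List Int), Dom_isTrionic nums → Spec_isTrionic nums (isTrionic nums)

-- ===== LEMMAS AND PROOFS =====

-- length of the leading run of the value v
def pvLead (v : Int) : List Int → Nat
  | [] => 0
  | x :: t => if x = v then pvLead v t + 1 else 0

theorem pvLead_le (v : Int) (s : List Int) : pvLead v s ≤ s.length := by
  induction s with
  | nil => simp [pvLead]
  | cons x t ih => simp only [pvLead]; split <;> simp <;> omega

theorem pvLead_head (v : Int) (s : List Int) (h : pvLead v s = 0) : s.head? ≠ some v := by
  cases s with
  | nil => simp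
  | cons x t => simp only [pvLead] at h; split at h <;> simp_all

theorem pvLead_drop_head (v : Int) (s : List Int) :
    (s.drop (pvLead v s)).head? ≠ some v := by
  induction s with
  | nil => simp
  | cons x t ih =>
    simp only [pvLead]
    split
    · simpa using ih
    · simpa using fun h => by simp_all

theorem pvLead_take (v : Int) (s : List Int) :
    s.take (pvLead v s) = List.replicate (pvLead v s) v := by
  induction s with
  | nil => simp [pvLead]
  | cons x t ih =>
    simp only [pvLead]
    split
    · simp_all [List.replicate_succ]
    · simp

-- the A-side scans computed on the sign list
theorem pvSigns_length (nums : List Int) : (pvSigns nums).length = nums.length - 1 := by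
  cases nums <;> simp [pvSigns]

theorem pvSigns_getElem (nums : List Int) (i : Nat) (h : i + 1 < nums.length) :
    (pvSigns nums)[i]'(by simp [pvSigns_length]; omega) =
      (if nums.getD i 0 < nums.getD (i + 1) 0 then (1 : Int) else 0) -
      (if nums.getD i 0 > nums.getD (i + 1) 0 then 1 else 0) := by
  have hi : i < nums.length := by omega
  have ht : i < nums.tail.length := by simp [List.length_tail]; omega
  simp [pvSigns, List.getElem_zip, List.getD_eq_getElem?_getD, List.getElem?_eq_getElem hi,
    List.getElem?_eq_getElem h, List.getElem_tail]

theorem pvUp_eq_lead (nums : List Int) (i : Nat) :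
    pvUp nums i = i + pvLead 1 ((pvSigns nums).drop i) := by
  fun_induction pvUp nums i with
  | case1 i h ih =>
    have hlt : i < (pvSigns nums).length := by simp [pvSigns_length]; omega
    have hdrop : (pvSigns nums).drop i = (pvSigns nums)[i] :: (pvSigns nums).drop (i + 1) :=
      List.drop_eq_getElem_cons hlt
    have hs : (pvSigns nums)[i]'hlt = 1 := by
      rcases h with ⟨h1, h2⟩
      have h3 : ¬ nums.getD i 0 > nums.getD (i + 1) 0 := by omega
      rw [pvSigns_getElem nums i h1, if_pos h2, if_neg h3]; norm_num
    rw [ih, hdrop, hs]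
    simp [pvLead]; omega
  | case2 i h =>
    by_cases hi : i + 1 < nums.length
    · have hlt : i < (pvSigns nums).length := by simp [pvSigns_length]; omega
      have hdrop : (pvSigns nums).drop i = (pvSigns nums)[i] :: (pvSigns nums).drop (i + 1) :=
        List.drop_eq_getElem_cons hlt
      have hge : ¬ nums.getD i 0 < nums.getD (i + 1) 0 := fun hc => h ⟨hi, hc⟩
      have hs : (pvSigns nums)[i]'hlt ≠ 1 := by
        rw [pvSigns_getElem nums i hi, if_neg hge]
        split <;> norm_num
      rw [hdrop]
      simp [pvLead, hs]
    · have : (pvSigns nums).drop i = [] := by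
        apply List.drop_eq_nil_of_le; simp [pvSigns_length]; omega
      simp [this, pvLead]

theorem pvDown_eq_lead (nums : List Int) (i : Nat) :
    pvDown nums i = i + pvLead (-1) ((pvSigns nums).drop i) := by
  fun_induction pvDown nums i with
  | case1 i h ih =>
    have hlt : i < (pvSigns nums).length := by simp [pvSigns_length]; omega
    have hdrop : (pvSigns nums).drop i = (pvSigns nums)[i] :: (pvSigns nums).drop (i + 1) :=
      List.drop_eq_getElem_cons hlt
    have hs : (pvSigns nums)[i]'hlt = -1 := by
      rcases h with ⟨h1, h2⟩
      have h3 : ¬ nums.getD i 0 < nums.getD (i + 1) 0 := by omega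
      rw [pvSigns_getElem nums i h1, if_neg h3, if_pos h2]; norm_num
    rw [ih, hdrop, hs]
    simp [pvLead]; omega
  | case2 i h =>
    by_cases hi : i + 1 < nums.length
    · have hlt : i < (pvSigns nums).length := by simp [pvSigns_length]; omega
      have hdrop : (pvSigns nums).drop i = (pvSigns nums)[i] :: (pvSigns nums).drop (i + 1) :=
        List.drop_eq_getElem_cons hlt
      have hge : ¬ nums.getD i 0 > nums.getD (i + 1) 0 := fun hc => h ⟨hi, hc⟩
      have hs : (pvSigns nums)[i]'hlt ≠ -1 := by
        rw [pvSigns_getElem nums i hi, if_neg hge]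
        split <;> norm_num
      rw [hdrop]
      simp [pvLead, hs]
    · have : (pvSigns nums).drop i = [] := by
        apply List.drop_eq_nil_of_le; simp [pvSigns_length]; omega
      simp [this, pvLead]

-- the B-side fold is destutter
theorem pvCollapse_go (s : List Int) : ∀ (p : List Int) (v : Int),
    s.foldl (fun acc x => if acc = [] ∨ acc.getLast? ≠ some x then acc ++ [x] else acc) (p ++ [v]) =
      p ++ List.destutter' (· ≠ ·) v s := by
  induction s with
  | nil => simp [List.destutter']
  | cons x t ih =>
    intro p v
    simp only [List.foldl_cons, List.destutter']
    by_cases h : v = x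
    · simp [h, ih]
    · have : (p ++ [v] = [] ∨ (p ++ [v]).getLast? ≠ some x) := by simp [h]
      simp only [if_pos this, if_pos (show v ≠ x from h)]
      rw [show p ++ [v] ++ [x] = (p ++ [v]) ++ [x] from rfl, ih]
      simp

theorem pvCollapse_eq_destutter (s : List Int) :
    pvCollapse s = List.destutter (· ≠ ·) s := by
  cases s with
  | nil => rfl
  | cons x t =>
    have := pvCollapse_go t [] x
    simpa [pvCollapse, List.destutter] using this

theorem destutter'_head (v : Int) (s : List Int) :
    ∃ r, List.destutter' (· ≠ ·) v s = v :: r := by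
  induction s generalizing v with
  | nil => exact ⟨[], rfl⟩
  | cons x t ih =>
    by_cases h : v = x
    · simpa [List.destutter', h] using ih x
    · exact ⟨List.destutter' (· ≠ ·) x t, by simp [List.destutter', h]⟩

theorem destutter'_replicate (v : Int) (k : Nat) (t : List Int) :
    List.destutter' (· ≠ ·) v (List.replicate k v ++ t) = List.destutter' (· ≠ ·) v t := by
  induction k with
  | zero => simp
  | succ n ih => simpa [List.replicate_succ, List.destutter'] using ih

-- peel the leading run of v from s inside destutter'
theorem destutter'_peel (v : Int) (s : List Int) :
    List.destutter' (· ≠ ·) v s = List.destutter' (· ≠ ·) v (s.drop (pvLead v s)) := by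
  conv_lhs => rw [← List.take_append_drop (pvLead v s) s, pvLead_take]
  exact destutter'_replicate v _ _

-- A's scan results expressed as a function of the sign list
def pvAfun (s : List Int) : Bool :=
  let a := pvLead 1 s
  if a = 0 ∨ a = s.length then false
  else
    let b := pvLead (-1) (s.drop a)
    if a + b = s.length then false
    else decide (a + b + pvLead 1 (s.drop (a + b)) = s.length)

theorem isTrionic_eq_Afun (nums : List Int) : isTrionic nums = pvAfun (pvSigns nums) := by
  cases hnums : nums with
  | nil => simp [isTrionic, pvAfun, pvUp, pvSigns, pvLead]
  | cons x t =>
    set s := pvSigns nums with hs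
    have hn : nums.length = s.length + 1 := by
      rw [pvSigns_length]; simp [hnums]
    have hup0 : pvUp nums 0 = pvLead 1 s := by simpa using pvUp_eq_lead nums 0
    rw [← hnums]
    simp only [isTrionic, pvAfun, hup0, hn, Nat.add_sub_cancel]
    by_cases h1 : pvLead 1 s = 0 ∨ pvLead 1 s = s.length
    · rw [if_pos h1, if_pos h1]
    · rw [if_neg h1, if_neg h1, pvDown_eq_lead nums (pvLead 1 s), ← hs]
      by_cases h2 : pvLead 1 s + pvLead (-1) (s.drop (pvLead 1 s)) = s.length
      · rw [if_pos h2, if_pos h2]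
      · rw [if_neg h2, if_neg h2, pvUp_eq_lead nums _, ← hs]

-- peeling a whole run of w (of positive length) off the front of destutter'
theorem destutter'_peel_run (v w : Int) (u : List Int) (hvw : v ≠ w) (hb : pvLead w u ≠ 0) :
    List.destutter' (· ≠ ·) v u = v :: List.destutter' (· ≠ ·) w (u.drop (pvLead w u)) := by
  obtain ⟨m, hm⟩ : ∃ m, pvLead w u = m + 1 := ⟨pvLead w u - 1, by omega⟩
  conv_lhs => rw [← List.take_append_drop (pvLead w u) u, pvLead_take]
  rw [hm, List.replicate_succ]
  simp only [List.cons_append, List.destutter']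
  rw [if_pos hvw, destutter'_replicate]

-- the core: A's three-scan verdict equals the collapsed-pattern test
theorem Afun_eq_destutter (s : List Int) :
    pvAfun s = decide (List.destutter (· ≠ ·) s = [1, -1, 1]) := by
  by_cases ha0 : pvLead 1 s = 0
  · -- first run not 1: destutter can't start with 1
    cases s with
    | nil => simp [pvAfun, pvLead]
    | cons x t =>
      have hx : x ≠ 1 := by simpa using pvLead_head 1 (x :: t) ha0
      obtain ⟨r, hr⟩ := destutter'_head x t
      simp [pvAfun, ha0, List.destutter, hr, hx]
  · set a := pvLead 1 s with hadef
    have ha := pvLead_le 1 s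
    have hsne : s ≠ [] := by
      intro h
      exact ha0 (by rw [hadef, h]; rfl)
    obtain ⟨x, t, hxt⟩ := List.exists_cons_of_ne_nil hsne
    have hx1 : x = 1 := by
      by_contra h
      have : pvLead 1 s = 0 := by simp [hxt, pvLead, h]
      exact ha0 this
    have hdes : List.destutter (· ≠ ·) s = List.destutter' (· ≠ ·) 1 (s.drop a) := by
      have h1 : s.drop a = t.drop (pvLead 1 t) := by
        rw [hadef, hxt, hx1]; simp [pvLead, List.drop_succ_cons]
      rw [h1, hxt, hx1]
      simp only [List.destutter]
      exact destutter'_peel 1 t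
    by_cases haL : a = s.length
    · have hdrop : s.drop a = [] := List.drop_eq_nil_of_le (le_of_eq haL.symm)
      simp [pvAfun, ← hadef, haL, hdes, hdrop, List.destutter']
    · set t1 := s.drop a with ht1
      have ht1ne : t1 ≠ [] := by
        rw [ht1]; intro h
        have := List.drop_eq_nil_iff.mp h
        omega
      have ht1h := pvLead_drop_head 1 s
      rw [← hadef, ← ht1] at ht1h
      set b := pvLead (-1) t1 with hbdef
      have hb := pvLead_le (-1) t1
      have ht1len : t1.length = s.length - a := by rw [ht1]; simp
      by_cases hb0 : b = 0
      · -- after the rise, neither fall nor further rise: sign 0 next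
        have hhead := pvLead_head (-1) t1 (hbdef ▸ hb0)
        obtain ⟨y, u, hyu⟩ := List.exists_cons_of_ne_nil ht1ne
        have hy1 : y ≠ 1 := by intro h; apply ht1h; simp [hyu, h]
        have hym1 : y ≠ -1 := by intro h; apply hhead; simp [hyu, h]
        have hlead1 : pvLead 1 t1 = 0 := by simp [hyu, pvLead, hy1]
        obtain ⟨r, hr⟩ := destutter'_head y u
        have h1y : (1 : Int) ≠ y := fun h => hy1 h.symm
        simp only [pvAfun, ← hadef, ← ht1, ← hbdef, hb0, Nat.add_zero, hlead1,
          if_neg haL]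
        split
        · simp [hdes, hyu, List.destutter', h1y, hr, hym1]
        · simp [haL, hdes, hyu, List.destutter', h1y, hr, hym1]
      · -- a genuine fall of length b
        have hdes2 : List.destutter' (· ≠ ·) 1 t1 = 1 :: List.destutter' (· ≠ ·) (-1) (t1.drop b) := by
          rw [hbdef]
          exact destutter'_peel_run 1 (-1) t1 (by norm_num) (by rw [← hbdef]; exact hb0)
        have hdropab : s.drop (a + b) = t1.drop b := by rw [ht1, List.drop_drop, Nat.add_comm]
        by_cases habL : a + b = s.length
        · have ht2nil : t1.drop b = [] := by
            apply List.drop_eq_nil_of_le; omega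
          simp [pvAfun, ← hadef, ← ht1, ← hbdef, ha0, haL, habL, hdes, hdes2, ht2nil,
            List.destutter']
        · set t2 := t1.drop b with ht2
          have ht2ne : t2 ≠ [] := by
            rw [ht2]; intro h
            have := List.drop_eq_nil_iff.mp h
            omega
          have ht2h := pvLead_drop_head (-1) t1
          rw [← hbdef, ← ht2] at ht2h
          set c := pvLead 1 t2 with hcdef
          have hc := pvLead_le 1 t2
          have ht2len : t2.length = t1.length - b := by rw [ht2]; simp
          have hres : pvAfun s = decide (a + b + c = s.length) := by
            simp [pvAfun, ← hadef, ← ht1, ← hbdef, ha0, haL, habL, hdropab, ← ht2, ← hcdef]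
          by_cases hc0 : c = 0
          · -- neither rise nor fall after the fall
            have hhead := pvLead_head 1 t2 (hcdef ▸ hc0)
            obtain ⟨z, w, hzw⟩ := List.exists_cons_of_ne_nil ht2ne
            have hz1 : z ≠ 1 := by intro h; apply hhead; simp [hzw, h]
            have hzm1 : z ≠ -1 := by intro h; apply ht2h; simp [hzw, h]
            obtain ⟨r, hr⟩ := destutter'_head z w
            have hm1z : (-1 : Int) ≠ z := fun h => hzm1 h.symm
            have : ¬ (a + b + c = s.length) := by omega
            simp [hres, this, hdes, hdes2, hzw, List.destutter', hm1z, hr, hz1]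
          · -- final rise of length c: trionic iff it reaches the end
            have hdes3 : List.destutter' (· ≠ ·) (-1) t2 = -1 :: List.destutter' (· ≠ ·) 1 (t2.drop c) := by
              rw [hcdef]
              exact destutter'_peel_run (-1) 1 t2 (by norm_num) (by rw [← hcdef]; exact hc0)
            have ht3h := pvLead_drop_head 1 t2
            rw [← hcdef] at ht3h
            have hiff : (a + b + c = s.length) ↔ t2.drop c = [] := by
              rw [List.drop_eq_nil_iff]
              omega
            by_cases hend : t2.drop c = []
            · have : a + b + c = s.length := hiff.mpr hend
              simp [hres, this, hdes, hdes2, hdes3, hend, List.destutter']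
            · obtain ⟨z, w, hzw⟩ := List.exists_cons_of_ne_nil hend
              have hz1 : z ≠ 1 := by intro h; apply ht3h; simp [hzw, h]
              obtain ⟨r, hr⟩ := destutter'_head z w
              have h1z : (1 : Int) ≠ z := fun h => hz1 h.symm
              have : ¬ (a + b + c = s.length) := fun h => hend (hiff.mp h)
              simp [hres, this, hdes, hdes2, hdes3, hzw, List.destutter', h1z, hr]

-- ===== VERDICT (by name: the statement is the Claim_ definition above) =====
theorem isTrionic_spec : Claim_equal_isTrionic := by
  intro nums _
  unfold Spec_isTrionic
  rw [isTrionic_eq_Afun, Afun_eq_destutter, isTrionic_alt, pvCollapse_eq_destutter]
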